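-- pv_equiv track=rewrite | github.com/gaufqwi/adventofcode | 2021/advent3.py | filterdata_co
-- ===== SOURCE A (Python) =====
-- def filterdata_co(data, pos):
--     onecount = 0
--     for n in data:
--         if n[pos] == '1':
--             onecount += 1
--     zerocount = len(data) - onecount
--     co = []
--     for n in data:
--         if (zerocount <= onecount and n[pos] == '0') or (zerocount > onecount and n[pos] == '1'):
--             co.append(n)
--     if len(co) == 1:
--         return int(co[0], 2)
--     else:
--         return filterdata_co(co, pos + 1)
-- ===== SOURCE B (Python) =====
-- def filterdata_co(data, pos):
--     while len(data) > 1: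
--         ones = sum(1 for s in data if s[pos] == '1')
--         keep = '0' if len(data) - ones <= ones else '1'
--         data = [s for s in data if s[pos] == keep]
--         pos += 1
--     return int(data[0], 2)
-- ===== Notes on version B (the rewrite author's own statement) =====
-- stated objective: simpler
-- what changed: Replaces the recursion by an iterative while-loop that computes the kept bit once and filters with a single comparison, instead of recomputing the compound two-clause condition and recursing.
-- crash fix: On a one-element list whose string is a valid binary literal A recurses forever on the emptied list (RecursionError) while B returns that single remaining number, the intended rating. — e.g. on filterdata_co(["101"], 0): A raises RecursionError, B returns 5
import Mathlib
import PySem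

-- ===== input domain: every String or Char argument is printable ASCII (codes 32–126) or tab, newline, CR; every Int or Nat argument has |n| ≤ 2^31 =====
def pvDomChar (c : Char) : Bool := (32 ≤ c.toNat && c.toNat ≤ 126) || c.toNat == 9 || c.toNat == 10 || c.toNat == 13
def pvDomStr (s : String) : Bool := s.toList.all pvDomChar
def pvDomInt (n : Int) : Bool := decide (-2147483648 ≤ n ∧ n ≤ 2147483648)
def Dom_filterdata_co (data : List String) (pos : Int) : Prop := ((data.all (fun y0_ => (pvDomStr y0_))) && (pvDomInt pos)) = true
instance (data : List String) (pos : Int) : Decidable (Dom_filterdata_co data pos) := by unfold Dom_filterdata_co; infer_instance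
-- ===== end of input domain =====

-- B replaces A's recursion by an iterative while-loop that computes the kept bit once and
-- filters with a single comparison (objective: simpler); both Pythons call int(s, 2), ported
-- once below as pyIntBase2 (exact on the ASCII strings int(s, 2) accepts, see pyBinLit).

-- whitespace stripped by int(s, 2) (the domain Dom_ restricts strings to printable ASCII + tab/LF/CR)
def pyWsChar (c : Char) : Bool := c == ' ' || c == '\t' || c == '\n' || c == '\r'

-- binary digits with single underscores between them, after a leading digit
def binDigitsRest : List Char → Bool
  | [] => true
  | '_' :: c :: r => (c == '0' || c == '1') && binDigitsRest r
  | c :: r => (c == '0' || c == '1') && binDigitsRest r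

-- acceptance of CPython's int(s, 2): strip whitespace, optional sign, optional 0b/0B prefix
def pyBinLit (l0 : List Char) : Bool :=
  let t1 := l0.dropWhile pyWsChar
  let t2 := (t1.reverse.dropWhile pyWsChar).reverse
  let t3 := match t2 with
    | '+' :: r => r
    | '-' :: r => r
    | r => r
  let t4 := match t3 with
    | '0' :: 'b' :: r => (match r with | '_' :: r' => r' | _ => r)
    | '0' :: 'B' :: r => (match r with | '_' :: r' => r' | _ => r)
    | r => r
  match t4 with
  | [] => false
  | c :: r => (c == '0' || c == '1') && binDigitsRest r

-- strips the optional 0b/0B prefix of a binary literal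
def pyStrip0b : List Char → List Char
  | '0' :: 'b' :: r => r
  | '0' :: 'B' :: r => r
  | r => r

-- digit run of a binary literal, underscores skipped
def pyInt2Digits (l : List Char) : Int :=
  l.foldl (fun a c => if c = '_' then a else 2 * a + (if c = '1' then 1 else 0)) 0

-- shared port of Python's int(s, 2): exact on the strings pyBinLit accepts (the only strings
-- the admitted inputs reach it with)
def pyIntBase2 (s : String) : Int :=
  let t1 := s.toList.dropWhile pyWsChar
  let t2 := (t1.reverse.dropWhile pyWsChar).reverse
  match t2 with
  | '-' :: r => - pyInt2Digits (pyStrip0b r)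
  | '+' :: r => pyInt2Digits (pyStrip0b r)
  | r => pyInt2Digits (pyStrip0b r)

-- ===== PORT A =====
-- A's recursion never terminates once the filtered list is empty (Python: RecursionError);
-- the fuel data.length + 1 covers every returning run admitted by Pre_.
def filterdata_coFuel : Nat → List String → Int → Int
  | 0, _, _ => 0
  | fuel + 1, data, pos =>
    let onecount : Int :=
      data.foldl (fun acc n => if PySem.Str.pyGet? n pos = some '1' then acc + 1 else acc) 0
    let zerocount : Int := (data.length : Int) - onecount
    let co : List String :=
      data.foldl (fun acc n =>
        if (zerocount ≤ onecount ∧ PySem.Str.pyGet? n pos = some '0') ∨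
           (zerocount > onecount ∧ PySem.Str.pyGet? n pos = some '1')
        then acc ++ [n] else acc) []
    if co.length = 1 then pyIntBase2 co.headI
    else filterdata_coFuel fuel co (pos + 1)

def filterdata_co (data : List String) (pos : Int) : Int :=
  filterdata_coFuel (data.length + 1) data pos

-- ===== PORT B =====
-- while len(data) > 1: …  — each executed iteration strictly shrinks data, so data.length
-- rounds cover every run; the 0-rounds-with-long-list branch is unreachable from the entry.
def filterdata_co_altGo : Nat → List String → Int → Int
  | 0, data, _ => if 1 < data.length then 0 else pyIntBase2 data.headI
  | fuel + 1, data, pos =>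
    if 1 < data.length then
      let ones : Int := (data.countP (fun s => PySem.Str.pyGet? s pos == some '1') : Int)
      let keep : Char := if (data.length : Int) - ones ≤ ones then '0' else '1'
      filterdata_co_altGo fuel (data.filter (fun s => PySem.Str.pyGet? s pos == some keep)) (pos + 1)
    else pyIntBase2 data.headI

def filterdata_co_alt (data : List String) (pos : Int) : Int :=
  filterdata_co_altGo data.length data pos

-- ===== PRECONDITION & SPEC =====
-- the group of strings A's round keeps: those carrying the less common bit at pos (counting
-- non-'1' characters as zeros, exactly as A does), ties keeping '0'
def coNext (data : List String) (pos : Int) : List String :=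
  data.filter (fun s => PySem.Str.pyGet? s pos ==
    some (if (data.length : Int) - (data.countP (fun s => PySem.Str.pyGet? s pos == some '1') : Int)
              ≤ (data.countP (fun s => PySem.Str.pyGet? s pos == some '1') : Int)
          then '0' else '1'))

-- the filtering chain from (data, pos) reaches a unique survivor that int(s, 2) accepts;
-- each kept group is strictly smaller than its list, so the chain length is bounded by the
-- number of strings, which drives the structural recursion (a domain predicate on the input)
def coOkSteps : Nat → List String → Int → Bool
  | 0, _, _ => false
  | bound + 1, data, pos =>
    if data.all (fun s => (PySem.Str.pyGet? s pos).isSome) then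
      if (coNext data pos).length = 1 then pyBinLit (coNext data pos).headI.toList
      else if (coNext data pos).length < data.length then coOkSteps bound (coNext data pos) (pos + 1)
      else false
    else false

def coOk (data : List String) (pos : Int) : Bool := coOkSteps data.length data pos

-- Pre_ = exactly the inputs on which A returns: every position the chain visits indexes every
-- string still present, and the chain reaches a unique survivor accepted by int(s, 2); on all
-- other inputs A raises (IndexError, ValueError or RecursionError).
def Pre_filterdata_co (data : List String) (pos : Int) : Prop :=
  coOk data pos = true
instance (data : List String) (pos : Int) : Decidable (Pre_filterdata_co data pos) := by
  unfold Pre_filterdata_co; infer_instance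

def pvWitness_filterdata_co : List String × Int := (["100", "110", "000", "010", "001"], 0)

-- On a one-element list of a valid binary literal A recurses on the emptied list forever
-- (Python RecursionError) while B returns that single remaining number, the intended rating.
def Raises_filterdata_co (data : List String) (pos : Int) : Prop :=
  data.length = 1 ∧ pyBinLit data.headI.toList = true
instance (data : List String) (pos : Int) : Decidable (Raises_filterdata_co data pos) := by
  unfold Raises_filterdata_co; infer_instance

def pvRaiseWitness_filterdata_co : List String × Int := (["101"], 0)
def pvRaiseWitnessOut_filterdata_co : Int := 5

def Spec_filterdata_co (data : List String) (pos : Int) (out : Int) : Prop :=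
  out = filterdata_co_alt data pos
instance (data : List String) (pos : Int) (out : Int) : Decidable (Spec_filterdata_co data pos out) := by
  unfold Spec_filterdata_co; infer_instance

-- ===== CLAIM (what is proved, stated in full; the proofs are below) =====
def Claim_equal_filterdata_co : Prop := ∀ (data : List String) (pos : Int), Dom_filterdata_co data pos → Pre_filterdata_co data pos → Spec_filterdata_co data pos (filterdata_co data pos)

def Claim_raises_filterdata_co : Prop := (∀ (data : List String) (pos : Int), Dom_filterdata_co data pos → Raises_filterdata_co data pos → ¬ Pre_filterdata_co data pos) ∧ (Dom_filterdata_co (pvRaiseWitness_filterdata_co.1) (pvRaiseWitness_filterdata_co.2) ∧ Raises_filterdata_co (pvRaiseWitness_filterdata_co.1) (pvRaiseWitness_filterdata_co.2) ∧ filterdata_co_alt (pvRaiseWitness_filterdata_co.1) (pvRaiseWitness_filterdata_co.2) = pvRaiseWitnessOut_filterdata_co)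

-- ===== LEMMAS AND PROOFS =====

theorem beq_eq_dec {α : Type} [DecidableEq α] [BEq α] [LawfulBEq α] (x y : α) :
    (x == y) = decide (x = y) := by
  by_cases h : x = y <;> simp [h]

-- counts of two mutually exclusive tests never exceed the length
theorem countP_disjoint {α : Type} (p q : α → Bool) (l : List α)
    (h : ∀ x ∈ l, p x = true → q x = false) :
    l.countP p + l.countP q ≤ l.length := by
  induction l with
  | nil => simp
  | cons a t ih =>
    have ht : ∀ x ∈ t, p x = true → q x = false := fun x hx => h x (by simp [hx])
    have := ih ht
    by_cases hp : p a = true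
    · have hq := h a (by simp) hp
      simp [hp, hq]; omega
    · simp only [List.countP_cons]
      rw [if_neg hp]
      cases hq : q a <;> simp <;> omega

-- the compound keep-or-drop test of A's loop is a single comparison with the kept bit
theorem cond_pointwise (L O : Int) (x : Option Char) :
    (decide ((L - O ≤ O ∧ x = some '0') ∨ (L - O > O ∧ x = some '1')))
      = (x == some (if L - O ≤ O then '0' else '1')) := by
  by_cases hb : L - O ≤ O
  · simp [hb, not_lt.mpr hb, beq_eq_dec]
  · simp [hb, lt_of_not_ge hb, beq_eq_dec]

-- one round of port A: count, filter, keep the coNext group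
theorem roundA (f : Nat) (data : List String) (pos : Int) :
    filterdata_coFuel (f + 1) data pos =
      if (coNext data pos).length = 1 then pyIntBase2 (coNext data pos).headI
      else filterdata_coFuel f (coNext data pos) (pos + 1) := by
  have hcount : data.foldl (fun acc n => if PySem.Str.pyGet? n pos = some '1' then acc + 1 else acc) (0 : Int)
      = (data.countP (fun s => PySem.Str.pyGet? s pos == some '1') : Int) := by
    rw [PySem.List.foldl_ite_add_one]
    have hsame : data.countP (fun x => decide (PySem.Str.pyGet? x pos = some '1'))
        = data.countP (fun s => PySem.Str.pyGet? s pos == some '1') :=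
      List.countP_congr (by intro x _; simp)
    rw [hsame]
    ring
  rw [filterdata_coFuel]
  simp only [hcount]
  rw [PySem.List.foldl_append_ite_eq_filter, List.nil_append]
  rw [List.filter_congr (fun s _ => cond_pointwise (data.length : Int)
    (data.countP (fun s => PySem.Str.pyGet? s pos == some '1') : Int) (PySem.Str.pyGet? s pos))]
  rfl

-- one round of port B, same step, for a list of at least two strings
theorem roundB (f : Nat) (data : List String) (pos : Int) (h2 : 1 < data.length) :
    filterdata_co_altGo (f + 1) data pos = filterdata_co_altGo f (coNext data pos) (pos + 1) := by
  rw [filterdata_co_altGo, if_pos h2]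
  rfl

theorem altGo_short (f : Nat) (data : List String) (pos : Int) (h : ¬ 1 < data.length) :
    filterdata_co_altGo f data pos = pyIntBase2 data.headI := by
  cases f <;> simp [filterdata_co_altGo, h]

theorem coOk_nil (b : Nat) (pos : Int) : coOkSteps b [] pos = false := by
  cases b <;> simp [coOkSteps, coNext]

-- a chain that reaches a survivor starts from at least two strings
theorem coOk_two_le (c : Nat) (data : List String) (pos : Int)
    (hok : coOkSteps c data pos = true) : 2 ≤ data.length := by
  by_cases hnil : data = []
  · rw [hnil, coOk_nil] at hok
    exact absurd hok (by simp)
  by_contra hlt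
  have h0 : 0 < data.length := by
    cases data with
    | nil => exact absurd rfl hnil
    | cons a t => simp
  have hcpos : c ≠ 0 := by
    intro h
    rw [h] at hok
    exact absurd hok (by simp [coOkSteps])
  obtain ⟨c', hc'⟩ : ∃ k, c = k + 1 := ⟨c - 1, by omega⟩
  rw [hc', coOkSteps] at hok
  by_cases hr : data.all (fun s => (PySem.Str.pyGet? s pos).isSome)
  · rw [if_pos hr] at hok
    have hdis : (data.countP (fun s => PySem.Str.pyGet? s pos == some '0'))
        + (data.countP (fun s => PySem.Str.pyGet? s pos == some '1')) ≤ data.length := by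
      apply countP_disjoint
      intro s _ hp
      simp only [beq_iff_eq] at hp ⊢
      rw [hp]
      simp
    have hnext : (coNext data pos).length = 0 := by
      unfold coNext
      by_cases hb : (data.length : Int) - (data.countP (fun s => PySem.Str.pyGet? s pos == some '1') : Int)
          ≤ (data.countP (fun s => PySem.Str.pyGet? s pos == some '1') : Int)
      · have hk : (if (data.length : Int) - (data.countP (fun s => PySem.Str.pyGet? s pos == some '1') : Int)
            ≤ (data.countP (fun s => PySem.Str.pyGet? s pos == some '1') : Int) then '0' else '1') = '0' :=
          if_pos hb
        rw [hk, ← List.countP_eq_length_filter]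
        omega
      · have hk : (if (data.length : Int) - (data.countP (fun s => PySem.Str.pyGet? s pos == some '1') : Int)
            ≤ (data.countP (fun s => PySem.Str.pyGet? s pos == some '1') : Int) then '0' else '1') = '1' :=
          if_neg hb
        rw [hk, ← List.countP_eq_length_filter]
        omega
    rw [if_neg (by omega)] at hok
    rw [if_pos (by omega)] at hok
    have hnn : coNext data pos = [] := List.length_eq_zero_iff.mp hnext
    rw [hnn, coOk_nil] at hok
    exact Bool.false_ne_true hok
  · rw [if_neg hr] at hok
    exact Bool.false_ne_true hok

theorem pre_two_le (data : List String) (pos : Int) (h : Pre_filterdata_co data pos) :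
    2 ≤ data.length := coOk_two_le data.length data pos h

-- main induction: with enough rounds available on each side, both ports return the survivor's value
theorem main_eq : ∀ (n : Nat) (data : List String) (pos : Int) (c fa fb : Nat),
    data.length ≤ n → coOkSteps c data pos = true →
    data.length + 1 ≤ fa → data.length ≤ fb →
    filterdata_coFuel fa data pos = filterdata_co_altGo fb data pos := by
  intro n
  induction n with
  | zero =>
    intro data pos c fa fb hn hok _ _
    have hnil : data = [] := List.length_eq_zero_iff.mp (by omega)
    rw [hnil, coOk_nil] at hok
    exact absurd hok (by simp)
  | succ n ih =>
    intro data pos c fa fb hn hok hfa hfb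
    have h2 : 2 ≤ data.length := coOk_two_le c data pos hok
    have hcpos : c ≠ 0 := by
      intro h
      rw [h] at hok
      exact absurd hok (by simp [coOkSteps])
    obtain ⟨c', hc'⟩ : ∃ k, c = k + 1 := ⟨c - 1, by omega⟩
    rw [hc', coOkSteps] at hok
    by_cases hr : data.all (fun s => (PySem.Str.pyGet? s pos).isSome)
    case neg => rw [if_neg hr] at hok; exact absurd hok (by simp)
    rw [if_pos hr] at hok
    obtain ⟨fa', hfa'⟩ : ∃ k, fa = k + 1 := ⟨fa - 1, by omega⟩
    obtain ⟨fb', hfb'⟩ : ∃ k, fb = k + 1 := ⟨fb - 1, by omega⟩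
    rw [hfa', hfb', roundA fa' data pos, roundB fb' data pos (by omega)]
    by_cases h1 : (coNext data pos).length = 1
    · rw [if_pos h1, altGo_short fb' _ _ (by omega)]
    · rw [if_neg h1]
      by_cases hlt : (coNext data pos).length < data.length
      case neg => rw [if_neg h1, if_neg hlt] at hok; exact absurd hok (by simp)
      rw [if_neg h1, if_pos hlt] at hok
      exact ih (coNext data pos) (pos + 1) c' fa' fb' (by omega) hok (by omega) (by omega)

theorem filterdata_co_spec' (data : List String) (pos : Int)
    (hpre : Pre_filterdata_co data pos) :
    filterdata_co data pos = filterdata_co_alt data pos := by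
  unfold Pre_filterdata_co coOk at hpre
  unfold filterdata_co filterdata_co_alt
  exact main_eq data.length data pos data.length (data.length + 1) data.length (le_refl _)
    hpre (le_refl _) (le_refl _)

-- ===== VERDICT (by name: the statement is the Claim_ definition above) =====
theorem filterdata_co_spec : Claim_equal_filterdata_co := by
  intro data pos _ hpre
  unfold Spec_filterdata_co
  exact filterdata_co_spec' data pos hpre

theorem filterdata_co_raises : Claim_raises_filterdata_co := by
  unfold Claim_raises_filterdata_co
  refine ⟨?_, by decide⟩
  intro data pos _ hr hpre
  have h2 := pre_two_le data pos hpre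
  obtain ⟨hl, -⟩ := hr
  omega

-- self-check: B's port really returns the stated literal at the raise witness
theorem pvRaiseWitness_filterdata_co_ok :
    filterdata_co_alt pvRaiseWitness_filterdata_co.1 pvRaiseWitness_filterdata_co.2
      = pvRaiseWitnessOut_filterdata_co :=
  filterdata_co_raises.2.2.2
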